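-- pv_equiv track=rewrite | github.com/daniel-reich/ubiquitous-fiesta | cGaTqHsPfR5H6YBuj_13.py | make_sandwich
-- ===== SOURCE A (Python) =====
-- def make_sandwich(i, f):
--   c = 0
--   while c < len(i):
--       if i[c] == f:
--           i.insert(c,'bread')
--           c+=2
--           i.insert(c,'bread')
--       else:
--           c+=1
--   return i
-- ===== SOURCE B (Python) =====
-- def make_sandwich(i, f):
--   # Two-pass: collect match indices, then insert 'bread' right-to-left in place.
--   idxs = [k for k, x in enumerate(i) if x == f]
--   for idx in reversed(idxs):
--     i.insert(idx + 1, 'bread')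
--     i.insert(idx, 'bread')
--   return i
-- ===== Notes on version B (the rewrite author's own statement) =====
-- stated objective: simpler
-- what changed: Replaces A's single stride-adjusting while-loop over a growing list by two passes: enumerate once to collect the indices of matches, then insert the two 'bread' strings at each collected index right-to-left so earlier indices stay valid.
import Mathlib
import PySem

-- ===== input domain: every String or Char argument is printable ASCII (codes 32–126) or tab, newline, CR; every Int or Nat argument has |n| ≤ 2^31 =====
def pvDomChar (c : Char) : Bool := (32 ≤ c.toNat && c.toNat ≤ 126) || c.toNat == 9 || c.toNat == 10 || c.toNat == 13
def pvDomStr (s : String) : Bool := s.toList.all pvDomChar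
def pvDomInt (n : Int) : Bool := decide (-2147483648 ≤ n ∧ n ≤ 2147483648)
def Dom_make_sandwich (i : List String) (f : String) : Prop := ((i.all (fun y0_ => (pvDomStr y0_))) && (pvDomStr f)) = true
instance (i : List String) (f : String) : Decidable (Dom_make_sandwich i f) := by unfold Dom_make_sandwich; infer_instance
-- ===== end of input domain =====

-- ===== PORT A =====
-- B changes the decomposition: one enumerate pass collecting match indices, then right-to-left
-- in-place insertions (both Pythons mutate the argument list in place; equivalence is about the return value).
-- Fuel 2*|i| bounds the loop's steps whenever the Python loop terminates (a totality guard, not an algorithm change).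
def msLoopA : Nat → List String → String → Nat → List String
  | 0, i, _, _ => i
  | fuel+1, i, f, c =>
    if h : c < i.length then
      if i[c] = f then
        msLoopA fuel
          (PySem.List.insert (PySem.List.insert i (c : Int) "bread") ((c : Int) + 2) "bread")
          f (c + 2)
      else msLoopA fuel i f (c + 1)
    else i

def make_sandwich (i : List String) (f : String) : List String :=
  msLoopA (2 * i.length) i f 0

-- ===== PORT B =====
def msStep (acc : List String) (idx : Int) : List String :=
  PySem.List.insert (PySem.List.insert acc (idx + 1) "bread") idx "bread"

def make_sandwich_alt (i : List String) (f : String) : List String :=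
  let idxs := ((PySem.List.enumerate i).filter (fun p => p.2 == f)).map (·.1)
  idxs.reverse.foldl msStep i

-- ===== PRECONDITION & SPEC =====
-- Pre_ excludes the inputs on which A never returns: if f = "bread" and "bread" occurs in i,
-- A's while loop keeps reinserting "bread" at the cursor and diverges; B returns the wrapped list there.
def Pre_make_sandwich (i : List String) (f : String) : Prop := ¬ (f = "bread" ∧ "bread" ∈ i)
instance (i : List String) (f : String) : Decidable (Pre_make_sandwich i f) := by
  unfold Pre_make_sandwich; infer_instance
def pvWitness_make_sandwich : List String × String := (["a", "x"], "x")

def Spec_make_sandwich (i : List String) (f : String) (out : List String) : Prop := out = make_sandwich_alt i f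
instance (i : List String) (f : String) (out : List String) : Decidable (Spec_make_sandwich i f out) := by unfold Spec_make_sandwich; infer_instance

-- ===== CLAIM (what is proved, stated in full; the proofs are below) =====
def Claim_equal_make_sandwich : Prop := ∀ (i : List String) (f : String), Dom_make_sandwich i f → Pre_make_sandwich i f → Spec_make_sandwich i f (make_sandwich i f)

-- ===== LEMMAS AND PROOFS =====

-- the value-level specification both sides are reduced to
def msWrap (f x : String) : List String := if x = f then ["bread", x, "bread"] else [x]

-- A's loop with processed prefix p computes p ++ wrapped rest
theorem msLoopA_eq (f : String) : ∀ (rest p : List String) (fuel : Nat),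
    (f = "bread" → "bread" ∉ rest) → 2 * rest.length ≤ fuel →
    msLoopA fuel (p ++ rest) f p.length = p ++ rest.flatMap (msWrap f) := by
  intro rest
  induction rest with
  | nil =>
    intro p fuel _ _
    cases fuel with
    | zero => simp [msLoopA]
    | succ fl =>
      rw [msLoopA, dif_neg (by simp)]
      simp
  | cons x rs ih =>
    intro p fuel hnb hfuel
    match fuel, hfuel with
    | fl + 2, hf2 =>
      have hlt : p.length < (p ++ x :: rs).length := by simp
      have hget : (p ++ x :: rs)[p.length]'hlt = x := by
        apply Option.some.inj
        rw [← List.getElem?_eq_getElem, List.getElem?_append_right (le_refl _)]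
        simp
      by_cases hx : x = f
      · -- match: two inserts, then the cursor sits on the trailing "bread" (a non-match step)
        subst hx
        have hfb : x ≠ "bread" := by
          intro hfb; exact hnb hfb (hfb ▸ List.mem_cons_self)
        have h1 : PySem.List.insert (p ++ x :: rs) (p.length : Int) "bread"
            = p ++ "bread" :: x :: rs := by
          rw [PySem.List.insert_natCast _ _ _ (by simp)]
          simp
        have h2 : PySem.List.insert (p ++ "bread" :: x :: rs) ((p.length : Int) + 2) "bread"
            = (p ++ ["bread", x]) ++ "bread" :: rs := by
          have he : ((p.length : Int) + 2) = ((p.length + 2 : Nat) : Int) := by push_cast; ring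
          rw [he, PySem.List.insert_natCast _ _ _ (by simp)]
          have hsplit : p ++ "bread" :: x :: rs = (p ++ ["bread", x]) ++ rs := by simp
          have hl2 : p.length + 2 = (p ++ ["bread", x]).length := by simp
          rw [hsplit, hl2, List.take_left, List.drop_left]
        have step1 : msLoopA (fl + 2) (p ++ x :: rs) x p.length
            = msLoopA (fl + 1) ((p ++ ["bread", x]) ++ "bread" :: rs) x (p.length + 2) := by
          rw [msLoopA, dif_pos hlt, if_pos hget, h1, h2]
        have hlt2 : p.length + 2 < ((p ++ ["bread", x]) ++ "bread" :: rs).length := by simp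
        have hget2 : ((p ++ ["bread", x]) ++ "bread" :: rs)[p.length + 2]'hlt2 = "bread" := by
          apply Option.some.inj
          rw [← List.getElem?_eq_getElem, List.getElem?_append_right (by simp)]
          simp
        have step2 : msLoopA (fl + 1) ((p ++ ["bread", x]) ++ "bread" :: rs) x (p.length + 2)
            = msLoopA fl ((p ++ ["bread", x]) ++ "bread" :: rs) x (p.length + 3) := by
          rw [msLoopA, dif_pos hlt2, if_neg (by rw [hget2]; exact fun h => hfb h.symm)]
        have hre : (p ++ ["bread", x]) ++ "bread" :: rs = (p ++ ["bread", x, "bread"]) ++ rs := by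
          simp
        have hlen : p.length + 3 = (p ++ ["bread", x, "bread"]).length := by simp
        rw [step1, step2, hre, hlen,
          ih (p ++ ["bread", x, "bread"]) fl (fun hfb' => absurd hfb' hfb) (by
            simp at hf2 ⊢; omega)]
        rw [List.flatMap_cons, show msWrap x x = ["bread", x, "bread"] by simp [msWrap]]
        simp
      · -- non-match step
        have step : msLoopA (fl + 2) (p ++ x :: rs) f p.length
            = msLoopA (fl + 1) ((p ++ [x]) ++ rs) f (p ++ [x]).length := by
          rw [msLoopA, dif_pos hlt, if_neg (by rw [hget]; exact hx)]
          simp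
        rw [step, ih (p ++ [x]) (fl + 1)
          (fun hfb hm => hnb hfb (List.mem_cons_of_mem _ hm)) (by
            simp at hf2 ⊢; omega)]
        simp [msWrap, hx]

-- the match indices of B, at a given enumerate start
def msIdx (f : String) (xs : List String) (s : Int) : List Int :=
  ((PySem.List.enumerate xs s).filter (fun p => p.2 == f)).map (·.1)

theorem msEnum_shift {α : Type} : ∀ (xs : List α) (s : Int),
    PySem.List.enumerate xs (s + 1) = (PySem.List.enumerate xs s).map (fun p => (p.1 + 1, p.2)) := by
  intro xs
  induction xs with
  | nil => intro s; simp [PySem.List.enumerate_nil]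
  | cons x rs ih =>
    intro s
    rw [PySem.List.enumerate_cons, PySem.List.enumerate_cons, List.map_cons,
      show s + 1 + 1 = (s + 1) + 1 from rfl, ih (s + 1)]

theorem msIdx_cons (f x : String) (rs : List String) (s : Int) :
    msIdx f (x :: rs) s = (if x == f then [s] else []) ++ msIdx f rs (s + 1) := by
  rw [msIdx, PySem.List.enumerate_cons, List.filter_cons]
  by_cases hx : x == f
  · simp [hx, msIdx]
  · simp [hx, msIdx]

theorem msIdx_shift (f : String) : ∀ (xs : List String) (s : Int),
    msIdx f xs (s + 1) = (msIdx f xs s).map (· + 1) := by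
  intro xs s
  rw [msIdx, msIdx, msEnum_shift, List.filter_map, List.map_map, List.map_map]
  rfl

-- every match index is a Nat below the list length
theorem msIdx_bound (f : String) (xs : List String) :
    ∀ idx ∈ msIdx f xs 0, ∃ n : Nat, idx = (n : Int) ∧ n < xs.length := by
  intro idx hidx
  simp only [msIdx, List.mem_map, List.mem_filter] at hidx
  obtain ⟨p, ⟨hp, _⟩, hfst⟩ := hidx
  rw [PySem.List.mem_enumerate_iff] at hp
  obtain ⟨k, hk, hpk⟩ := hp
  exact ⟨k, by simp [← hfst, hpk], hk⟩

def msFoldr (idxs : List Int) (l : List String) : List String :=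
  idxs.foldr (fun idx acc => msStep acc idx) l

theorem msFoldr_cons (j : Int) (rest : List Int) (l : List String) :
    msFoldr (j :: rest) l = msStep (msFoldr rest l) j := rfl

theorem msFoldr_length : ∀ (idxs : List Int) (l : List String),
    (msFoldr idxs l).length = l.length + 2 * idxs.length := by
  intro idxs
  induction idxs with
  | nil => intro l; simp [msFoldr]
  | cons j rest ih =>
    intro l
    rw [msFoldr_cons, msStep, PySem.List.length_insert, PySem.List.length_insert, ih]
    simp; omega

-- insertion at a successor index commutes with cons
theorem msInsert_cons (t : List String) (x v : String) (n : Nat) (h : n ≤ t.length) :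
    PySem.List.insert (x :: t) ((n : Int) + 1) v = x :: PySem.List.insert t (n : Int) v := by
  have h1 : ((n : Int) + 1) = ((n + 1 : Nat) : Int) := by push_cast; ring
  rw [h1, PySem.List.insert_natCast _ _ _ (by simp; omega),
    PySem.List.insert_natCast _ _ _ h]
  simp

theorem msStep_cons (u : List String) (x : String) (n : Nat) (h : n < u.length) :
    msStep (x :: u) ((n : Int) + 1) = x :: msStep u (n : Int) := by
  rw [msStep, msStep,
    show ((n : Int) + 1 + 1) = (((n + 1 : Nat) : Int) + 1) by push_cast; ring,
    msInsert_cons _ _ _ _ (by omega),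
    show (((n + 1 : Nat)) : Int) = ((n : Int) + 1) by push_cast; ring,
    msInsert_cons _ _ _ _ (by rw [PySem.List.length_insert]; omega)]

theorem msFoldr_shift : ∀ (idxs : List Int) (t : List String) (x : String),
    (∀ idx ∈ idxs, ∃ n : Nat, idx = (n : Int) ∧ n < t.length) →
    msFoldr (idxs.map (· + 1)) (x :: t) = x :: msFoldr idxs t := by
  intro idxs
  induction idxs with
  | nil => intro t x _; simp [msFoldr]
  | cons j rest ih =>
    intro t x hb
    obtain ⟨n, hj, hn⟩ := hb j List.mem_cons_self
    have hrest : ∀ idx ∈ rest, ∃ n : Nat, idx = (n : Int) ∧ n < t.length :=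
      fun idx hidx => hb idx (List.mem_cons_of_mem _ hidx)
    rw [List.map_cons, msFoldr_cons, ih t x hrest, hj, msFoldr_cons]
    exact msStep_cons _ x n (by rw [msFoldr_length]; omega)

theorem msFoldr_idx_eq (f : String) : ∀ (xs : List String),
    msFoldr (msIdx f xs 0) xs = xs.flatMap (msWrap f) := by
  intro xs
  induction xs with
  | nil => simp [msFoldr, msIdx, PySem.List.enumerate_nil]
  | cons x rs ih =>
    have hshift : msIdx f rs 1 = (msIdx f rs 0).map (· + 1) := by
      have h := msIdx_shift f rs 0
      simpa using h
    have hb : ∀ idx ∈ msIdx f rs 0, ∃ n : Nat, idx = (n : Int) ∧ n < rs.length :=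
      msIdx_bound f rs
    by_cases hx : x = f
    · have hidx : msIdx f (x :: rs) 0 = (0 : Int) :: (msIdx f rs 0).map (· + 1) := by
        rw [msIdx, PySem.List.enumerate_cons, List.filter_cons]
        simp only [hx, beq_self_eq_true, if_pos]
        rw [List.map_cons, ← msIdx, show ((0 : Int) + 1) = 1 by norm_num, hshift]
      rw [hidx, msFoldr_cons, msFoldr_shift _ rs x hb, ih, msStep,
        show ((0 : Int) + 1) = (((0 : Nat) : Int) + 1) by norm_num,
        msInsert_cons _ _ _ _ (by simp),
        show (((0 : Nat)) : Int) = (0 : Int) by norm_num,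
        PySem.List.insert_zero, PySem.List.insert_zero]
      simp [msWrap, hx]
    · have hidx : msIdx f (x :: rs) 0 = (msIdx f rs 0).map (· + 1) := by
        rw [msIdx_cons, show ((0 : Int) + 1) = 1 by norm_num, hshift]
        simp [hx]
      rw [hidx, msFoldr_shift _ rs x hb, ih]
      simp [msWrap, hx]

theorem make_sandwich_alt_eq (i : List String) (f : String) :
    make_sandwich_alt i f = i.flatMap (msWrap f) := by
  unfold make_sandwich_alt
  rw [List.foldl_reverse]
  exact msFoldr_idx_eq f i

theorem make_sandwich_eq (i : List String) (f : String) (h : f = "bread" → "bread" ∉ i) :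
    make_sandwich i f = i.flatMap (msWrap f) := by
  unfold make_sandwich
  have h0 := msLoopA_eq f i [] (2 * i.length) h (le_refl _)
  simpa using h0

-- ===== VERDICT (by name: the statement is the Claim_ definition above) =====
theorem make_sandwich_spec : Claim_equal_make_sandwich := by
  intro i f _ hpre
  unfold Spec_make_sandwich
  rw [make_sandwich_eq i f (fun hfb hm => hpre ⟨hfb, hfb ▸ hm⟩), make_sandwich_alt_eq]
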